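-- pv_equiv track=rewrite | github.com/MinhHaDuong/agentic-harness | scripts/bib-merge.py | _bump_suffix
-- ===== SOURCE A (Python) =====
-- def _bump_suffix(key: str, existing_keys: set[str]) -> str:
--     """Append 'b', 'c', ... until the key is unique."""
--     if key not in existing_keys:
--         return key
--     for ch in "bcdefghijklmnopqrstuvwxyz":
--         candidate = key + ch
--         if candidate not in existing_keys:
--             return candidate
--     # Last resort: numeric suffix
--     n = 2
--     while True:
--         candidate = f"{key}{n}"
--         if candidate not in existing_keys:
--             return candidate
--         n += 1
-- ===== SOURCE B (Python) =====
-- LETTERS = "bcdefghijklmnopqrstuvwxyz"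
--
--
-- def _dec_value(s):
--     """Horner-parse an all-digit string to an int; None if empty or non-digit."""
--     if not s:
--         return None
--     v = 0
--     for c in s:
--         if not ("0" <= c <= "9"):
--             return None
--         v = 10 * v + (ord(c) - 48)
--     return v
--
--
-- def _bump_suffix(key, existing_keys):
--     # Index pass: strip the key prefix once, so every later test is on suffixes.
--     p = len(key)
--     used = {k[p:] for k in existing_keys if k.startswith(key)}
--     if "" not in used:
--         return key
--     free = [c for c in LETTERS if c not in used]
--     if free:
--         return key + free[0]
--     # Numeric stage: parse the taken numeric suffixes and compute the least
--     # free n >= 2 by a single ascending (mex) scan over the sorted values.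
--     taken = {v for s in used
--              if (v := _dec_value(s)) is not None and v >= 2 and str(v) == s}
--     n = 2
--     for v in sorted(taken):
--         if v == n:
--             n += 1
--     return f"{key}{n}"
-- ===== Notes on version B (the rewrite author's own statement) =====
-- stated objective: alternative
-- what changed: Instead of A's trial loops that test candidate after candidate against the full key set (guard, letter for-loop, unbounded while over numbers), B builds a suffix index in one pass (strips the key prefix from the matching keys into a set), answers the bare-key and letter stages by set selection on that index, and replaces the unbounded numeric while-loop by parsing the taken numeric suffixes and computing the least free n>=2 with a sorted mex scan.
import Mathlib
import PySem

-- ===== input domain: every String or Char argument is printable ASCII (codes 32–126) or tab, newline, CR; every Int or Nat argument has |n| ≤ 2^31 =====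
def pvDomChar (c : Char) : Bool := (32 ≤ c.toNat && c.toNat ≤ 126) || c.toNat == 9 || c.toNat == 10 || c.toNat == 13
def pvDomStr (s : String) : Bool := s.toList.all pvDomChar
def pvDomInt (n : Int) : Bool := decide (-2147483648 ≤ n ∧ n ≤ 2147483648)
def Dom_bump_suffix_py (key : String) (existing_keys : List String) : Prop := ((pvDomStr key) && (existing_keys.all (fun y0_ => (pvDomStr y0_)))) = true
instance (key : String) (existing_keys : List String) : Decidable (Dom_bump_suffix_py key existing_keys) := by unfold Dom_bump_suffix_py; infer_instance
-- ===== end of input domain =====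

-- B replaces A's candidate-by-candidate trial loops (guard, letter for-loop, unbounded numeric
-- while-loop, each testing full keys against the set) by a suffix index built in one pass plus
-- set selections, with the numeric stage answered by a sorted mex scan over the parsed taken
-- suffixes (objective: alternative; same results, no speed claim).

-- ===== PORT A =====
-- Helper theory needed only so Lean can see A's unbounded numeric loop terminates:
-- decimal printing is injective, so among |existing_keys|+1 consecutive numeric
-- candidates one is always free (pigeonhole).

/-- Decimal digits of a natural number (most significant first); equals `Nat.toDigits 10`. -/
def pvNatDigits (n : Nat) : List Char :=
  if _h : n < 10 then [Nat.digitChar n] else pvNatDigits (n / 10) ++ [Nat.digitChar (n % 10)]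
decreasing_by exact Nat.div_lt_self (by omega) (by omega)

theorem pvToDigitsCore_eq : ∀ (f n : Nat) (ds : List Char), n < f →
    Nat.toDigitsCore 10 f n ds = pvNatDigits n ++ ds := by
  intro f
  induction f with
  | zero => intro n ds h; omega
  | succ f ih =>
    intro n ds h
    rw [Nat.toDigitsCore]
    by_cases h0 : n / 10 = 0
    · have h10 : n < 10 := by
        rcases Nat.div_eq_zero_iff.mp h0 with h' | h' <;> omega
      rw [if_pos h0, pvNatDigits, dif_pos h10, Nat.mod_eq_of_lt h10]
      rfl
    · have h10 : ¬ n < 10 := by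
        intro hc; exact h0 (Nat.div_eq_of_lt hc)
      have hlt : n / 10 < f := by
        have := Nat.div_lt_self (n := n) (by omega) (by omega : 1 < 10)
        omega
      rw [if_neg h0, ih (n / 10) _ hlt,
        show pvNatDigits n = pvNatDigits (n / 10) ++ [(n % 10).digitChar] from by
          rw [pvNatDigits, dif_neg h10]]
      simp

theorem pvToDigits_eq (n : Nat) : Nat.toDigits 10 n = pvNatDigits n := by
  rw [Nat.toDigits, pvToDigitsCore_eq (n + 1) n [] (by omega), List.append_nil]

theorem pvVal_natDigits (n : Nat) :
    (pvNatDigits n).foldl (fun a c => a * 10 + (c.toNat - 48)) 0 = n := by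
  induction n using Nat.strong_induction_on with
  | _ n ih =>
    rw [pvNatDigits]
    by_cases h : n < 10
    · rw [dif_pos h]
      interval_cases n <;> decide
    · rw [dif_neg h, List.foldl_append]
      rw [ih (n / 10) (Nat.div_lt_self (by omega) (by omega))]
      have hr : n % 10 < 10 := Nat.mod_lt _ (by omega)
      have hc : ∀ r : Nat, r < 10 → (Nat.digitChar r).toNat - 48 = r := by decide
      simp only [List.foldl]
      rw [hc _ hr]
      omega

theorem pvToDigits_inj {m n : Nat} (h : Nat.toDigits 10 m = Nat.toDigits 10 n) : m = n := by
  rw [pvToDigits_eq, pvToDigits_eq] at h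
  have := congrArg (List.foldl (fun a c => a * 10 + (c.toNat - 48)) 0) h
  rwa [pvVal_natDigits, pvVal_natDigits] at this

theorem pvToChars_inj {m n : Nat}
    (h : PySem.Int.toChars (m : Int) = PySem.Int.toChars (n : Int)) : m = n := by
  simp only [PySem.Int.toChars] at h
  rw [if_neg (by omega), if_neg (by omega), Int.toNat_natCast, Int.toNat_natCast] at h
  exact pvToDigits_inj h

theorem pvAppend_toStr_inj (key : String) {m n : Nat}
    (h : key ++ PySem.Int.toStr (m : Int) = key ++ PySem.Int.toStr (n : Int)) : m = n := by
  have h2 := congrArg String.toList h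
  rw [String.toList_append, String.toList_append] at h2
  have h3 := List.append_cancel_left h2
  rw [PySem.Int.toList_toStr, PySem.Int.toList_toStr] at h3
  exact pvToChars_inj h3

/-- Pigeonhole: among `existing_keys.length + 1` consecutive numeric candidates one is free. -/
theorem pvExistsFreeNum (key : String) (ex : List String) (n : Nat) :
    ∃ m : Nat, key ++ PySem.Int.toStr ((n + m : Nat) : Int) ∉ ex := by
  by_contra hc
  push Not at hc
  set W : List String :=
    (List.range (ex.length + 1)).map (fun m => key ++ PySem.Int.toStr ((n + m : Nat) : Int))
    with hW
  have hnd : W.Nodup := by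
    refine List.Nodup.map_on ?_ (List.nodup_range)
    intro x _ y _ hxy
    have := pvAppend_toStr_inj key hxy
    omega
  have hlen : W.length = ex.length + 1 := by simp [hW]
  have hsub : W.toFinset ⊆ ex.toFinset := by
    intro x hx
    rw [List.mem_toFinset] at hx ⊢
    rw [hW, List.mem_map] at hx
    obtain ⟨m, _, rfl⟩ := hx
    exact hc m
  have hcard := Finset.card_le_card hsub
  rw [List.toFinset_card_of_nodup hnd, hlen] at hcard
  have := List.toFinset_card_le ex
  omega

/-- A's final `while True` loop: try `key + str(n)`, `n = 2, 3, …`. -/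
def pvNumLoopA (key : String) (ex : List String) (n : Nat) : String :=
  if key ++ PySem.Int.toStr (n : Int) ∈ ex then pvNumLoopA key ex (n + 1)
  else key ++ PySem.Int.toStr (n : Int)
termination_by Nat.find (pvExistsFreeNum key ex n)
decreasing_by
  rename_i h
  have hspec := Nat.find_spec (pvExistsFreeNum key ex n)
  set m0 := Nat.find (pvExistsFreeNum key ex n) with hm0
  have hne : m0 ≠ 0 := by
    intro hzero
    rw [hzero] at hspec
    simp only [Nat.add_zero] at hspec
    exact hspec h
  have hnext : key ++ PySem.Int.toStr (((n + 1) + (m0 - 1) : Nat) : Int) ∉ ex := by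
    have he : (n + 1) + (m0 - 1) = n + m0 := by omega
    rw [he]; exact hspec
  have hle : Nat.find (pvExistsFreeNum key ex (n + 1)) ≤ m0 - 1 := Nat.find_le hnext
  omega

/-- A's `for ch in "bcdefghijklmnopqrstuvwxyz"` loop, falling through to the numeric loop. -/
def pvLetterLoopA (key : String) (ex : List String) : List Char → String
  | [] => pvNumLoopA key ex 2
  | c :: rest =>
    if key ++ String.singleton c ∈ ex then pvLetterLoopA key ex rest
    else key ++ String.singleton c

def bump_suffix_py (key : String) (existing_keys : List String) : String :=
  if key ∉ existing_keys then key
  else pvLetterLoopA key existing_keys "bcdefghijklmnopqrstuvwxyz".toList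

-- ===== PORT B =====

def pvLETTERS : String := "bcdefghijklmnopqrstuvwxyz"

/-- B's `_dec_value` Horner loop body (`for c in s: …` with an early `return None`). -/
def pvDecGo : List Char → Int → Option Int
  | [], v => some v
  | c :: cs, v =>
    if '0' ≤ c ∧ c ≤ '9' then pvDecGo cs (10 * v + ((c.toNat : Int) - 48)) else none

/-- B's `_dec_value(s)`: Horner-parse an all-digit string; `none` if empty or non-digit. -/
def pvDec (s : String) : Option Int :=
  if s.toList = [] then none else pvDecGo s.toList 0

/-- B's numeric-suffix filter: `(v := _dec_value(s)) is not None and v >= 2 and str(v) == s`. -/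
def pvNumOK (s : String) : Bool :=
  match pvDec s with
  | some v => decide (2 ≤ v) && (PySem.Int.toStr v == s)
  | none => false

/-- B's suffix index: `{k[p:] for k in existing_keys if k.startswith(key)}`. -/
def pvUsed (key : String) (ex : List String) : PySem.Set String :=
  PySem.Set.ofList ((ex.filter (fun k => PySem.Str.startswith k key)).map
    (fun k => PySem.Str.slice k (some (PySem.Str.len key)) none))

/-- B's `taken`: the set of parsed canonical numeric suffixes ≥ 2. -/
def pvTaken (used : PySem.Set String) : PySem.Set Int :=
  PySem.Set.ofList ((used.filter pvNumOK).map (fun s => (pvDec s).getD 0))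

def bump_suffix_py_alt (key : String) (existing_keys : List String) : String :=
  let used := pvUsed key existing_keys
  if !(PySem.Set.contains used "") then key
  else
    match pvLETTERS.toList.filter (fun c => !(PySem.Set.contains used (String.singleton c))) with
    | c :: _ => key ++ String.singleton c
    | [] =>
      key ++ PySem.Int.toStr
        ((PySem.List.sorted (pvTaken used) (fun v => v) false).foldl
          (fun n v => if v == n then n + 1 else n) 2)

-- ===== PRECONDITION & SPEC =====
def Spec_bump_suffix_py (key : String) (existing_keys : List String) (out : String) : Prop := out = bump_suffix_py_alt key existing_keys
instance (key : String) (existing_keys : List String) (out : String) : Decidable (Spec_bump_suffix_py key existing_keys out) := by unfold Spec_bump_suffix_py; infer_instance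

-- ===== CLAIM (what is proved, stated in full; the proofs are below) =====
def Claim_equal_bump_suffix_py : Prop := ∀ (key : String) (existing_keys : List String), Dom_bump_suffix_py key existing_keys → Spec_bump_suffix_py key existing_keys (bump_suffix_py key existing_keys)

-- ===== LEMMAS AND PROOFS =====

theorem pvSlice_append (key t : String) :
    PySem.Str.slice (key ++ t) (some (PySem.Str.len key)) none = t := by
  apply String.toList_inj.mp
  rw [PySem.Str.toList_slice]
  simp [PySem.Str.len_eq, String.toList_append, PySem.List.slice_from_natCast]

/-- The suffix index contains `t` exactly when `key ++ t` is an existing key. -/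
theorem pvMem_used (key : String) (ex : List String) (t : String) :
    t ∈ pvUsed key ex ↔ key ++ t ∈ ex := by
  rw [pvUsed, PySem.Set.mem_ofList, List.mem_map]
  constructor
  · rintro ⟨k, hk, rfl⟩
    rw [List.mem_filter] at hk
    obtain ⟨hkex, hsw⟩ := hk
    rw [PySem.Str.startswith_eq, PySem.Chars.startswith_iff] at hsw
    obtain ⟨r, hr⟩ := hsw
    have hk' : k = key ++ String.ofList r := by
      apply String.toList_inj.mp
      rw [String.toList_append, String.toList_ofList, ← hr]
    rw [hk', pvSlice_append]
    rw [hk'] at hkex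
    exact hkex
  · intro h
    refine ⟨key ++ t, ?_, pvSlice_append key t⟩
    rw [List.mem_filter]
    refine ⟨h, ?_⟩
    rw [PySem.Str.startswith_eq, PySem.Chars.startswith_iff, String.toList_append]
    exact List.prefix_append _ _

theorem pvNatDigits_ne_nil (n : Nat) : pvNatDigits n ≠ [] := by
  rw [pvNatDigits]
  split <;> simp

theorem pvNatDigits_digits (n : Nat) : ∀ c ∈ pvNatDigits n, '0' ≤ c ∧ c ≤ '9' := by
  induction n using Nat.strong_induction_on with
  | _ n ih =>
    rw [pvNatDigits]
    by_cases h : n < 10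
    · rw [dif_pos h]
      intro c hc
      rw [List.mem_singleton] at hc
      subst hc
      interval_cases n <;> decide
    · rw [dif_neg h]
      intro c hc
      rcases List.mem_append.mp hc with hc | hc
      · exact ih (n / 10) (Nat.div_lt_self (by omega) (by omega)) c hc
      · rw [List.mem_singleton] at hc
        subst hc
        have hr : n % 10 < 10 := Nat.mod_lt _ (by omega)
        interval_cases hx : n % 10 <;> simp_all <;> decide

theorem pvDecGo_digits : ∀ (ds : List Char), (∀ c ∈ ds, '0' ≤ c ∧ c ≤ '9') → ∀ v : Int,
    pvDecGo ds v = some (ds.foldl (fun a c => 10 * a + ((c.toNat : Int) - 48)) v) := by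
  intro ds
  induction ds with
  | nil => intro _ v; rfl
  | cons c cs ih =>
    intro h v
    rw [pvDecGo, if_pos (h c (List.mem_cons_self))]
    exact ih (fun d hd => h d (List.mem_cons_of_mem _ hd)) _

theorem pvFoldInt_eq_foldNat : ∀ (ds : List Char), (∀ c ∈ ds, '0' ≤ c ∧ c ≤ '9') → ∀ w : Nat,
    ds.foldl (fun a c => 10 * a + ((c.toNat : Int) - 48)) (w : Int)
      = ((ds.foldl (fun a c => a * 10 + (c.toNat - 48)) w : Nat) : Int) := by
  intro ds
  induction ds with
  | nil => intro _ w; rfl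
  | cons c cs ih =>
    intro h w
    have hc := h c (List.mem_cons_self)
    have h48 : 48 ≤ c.toNat := hc.1
    simp only [List.foldl]
    rw [show 10 * (w : Int) + ((c.toNat : Int) - 48) = ((w * 10 + (c.toNat - 48) : Nat) : Int) by
      push_cast [h48]; ring]
    exact ih (fun d hd => h d (List.mem_cons_of_mem _ hd)) _

/-- Parsing B's own rendering of `m ≥ 0` gives back `m`. -/
theorem pvDec_toStr (m : Int) (h : 0 ≤ m) : pvDec (PySem.Int.toStr m) = some m := by
  have htl : (PySem.Int.toStr m).toList = pvNatDigits m.toNat := by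
    rw [PySem.Int.toList_toStr, PySem.Int.toChars, if_neg (by omega), pvToDigits_eq]
  rw [pvDec, htl, if_neg (pvNatDigits_ne_nil _),
    pvDecGo_digits _ (pvNatDigits_digits _) 0,
    show (0 : Int) = ((0 : Nat) : Int) from rfl,
    pvFoldInt_eq_foldNat _ (pvNatDigits_digits _) 0, pvVal_natDigits,
    Int.toNat_of_nonneg h]

/-- `taken` holds exactly the values `m ≥ 2` whose rendering is a used suffix. -/
theorem pvMem_taken (used : PySem.Set String) (m : Int) :
    m ∈ pvTaken used ↔ 2 ≤ m ∧ PySem.Int.toStr m ∈ used := by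
  rw [pvTaken, PySem.Set.mem_ofList, List.mem_map]
  constructor
  · rintro ⟨s, hs, rfl⟩
    rw [List.mem_filter] at hs
    obtain ⟨hmem, hok⟩ := hs
    rw [pvNumOK] at hok
    rcases hd : pvDec s with _ | v
    · rw [hd] at hok; exact absurd hok (by simp)
    · rw [hd] at hok
      rw [Bool.and_eq_true, decide_eq_true_eq, beq_iff_eq] at hok
      simp only [Option.getD_some]
      exact ⟨hok.1, hok.2 ▸ hmem⟩
  · rintro ⟨h2, hmem⟩
    refine ⟨PySem.Int.toStr m, ?_, ?_⟩
    · rw [List.mem_filter]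
      refine ⟨hmem, ?_⟩
      rw [pvNumOK, pvDec_toStr m (by omega)]
      simp [h2]
    · rw [pvDec_toStr m (by omega), Option.getD_some]

/-- The mex scan over a strictly increasing list: the result is ≥ the start, free,
    and every value between start and result is in the list. -/
theorem pvScan_spec (L : List Int) (hL : L.Pairwise (· < ·)) : ∀ n : Int,
    n ≤ L.foldl (fun n v => if v == n then n + 1 else n) n ∧
    L.foldl (fun n v => if v == n then n + 1 else n) n ∉ L ∧
    (∀ j : Int, n ≤ j → j < L.foldl (fun n v => if v == n then n + 1 else n) n → j ∈ L) := by
  induction L with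
  | nil =>
    intro n
    refine ⟨le_refl n, by simp, ?_⟩
    simp only [List.foldl_nil]
    intro j h1 h2; omega
  | cons v rest ih =>
    rw [List.pairwise_cons] at hL
    obtain ⟨hgt, hrest⟩ := hL
    intro n
    simp only [List.foldl_cons]
    by_cases hv : v = n
    · subst hv
      rw [if_pos (by simp)]
      obtain ⟨ih1, ih2, ih3⟩ := ih hrest (v + 1)
      refine ⟨by omega, ?_, ?_⟩
      · rw [List.mem_cons]
        rintro (h | h)
        · omega
        · exact ih2 h
      · intro j h1 h2
        rw [List.mem_cons]
        by_cases hj : j = v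
        · exact Or.inl hj
        · exact Or.inr (ih3 j (by omega) h2)
    · rw [if_neg (by simp [hv])]
      obtain ⟨ih1, ih2, ih3⟩ := ih hrest n
      refine ⟨ih1, ?_, ?_⟩
      · rw [List.mem_cons]
        rintro (h | h)
        · rcases lt_or_gt_of_ne hv with hlt | hgt'
          · omega
          · have hn : (n : Int) ∈ rest := ih3 n (le_refl n) (by omega)
            have := hgt n hn
            omega
        · exact ih2 h
      · intro j h1 h2
        exact List.mem_cons_of_mem _ (ih3 j h1 h2)

/-- A's numeric loop returns the first free numeric candidate. -/
theorem pvNumLoopA_eq (key : String) (ex : List String) : ∀ (n : Nat), ∀ (m : Nat),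
    n ≤ m → key ++ PySem.Int.toStr (m : Int) ∉ ex →
    (∀ j : Nat, n ≤ j → j < m → key ++ PySem.Int.toStr (j : Int) ∈ ex) →
    pvNumLoopA key ex n = key ++ PySem.Int.toStr (m : Int) := by
  intro n
  induction n using pvNumLoopA.induct key ex with
  | case1 n hmem ih =>
    intro m hnm hfree hbusy
    have hne : m ≠ n := by
      intro h; rw [h] at hfree; exact hfree hmem
    rw [pvNumLoopA, if_pos hmem]
    exact ih m (by omega) hfree (fun j h1 h2 => hbusy j (by omega) h2)
  | case2 n hmem =>
    intro m hnm hfree hbusy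
    have hmn : m = n := by
      by_contra h
      exact hmem (hbusy n (le_refl n) (by omega))
    rw [pvNumLoopA, if_neg hmem, hmn]

/-- A's numeric loop agrees with B's sorted mex scan over the parsed taken suffixes. -/
theorem pvNum_eq (key : String) (ex : List String) :
    pvNumLoopA key ex 2 =
      key ++ PySem.Int.toStr
        ((PySem.List.sorted (pvTaken (pvUsed key ex)) (fun v => v) false).foldl
          (fun n v => if v == n then n + 1 else n) 2) := by
  have hpw : (PySem.List.sorted (pvTaken (pvUsed key ex)) (fun v => v) false).Pairwise (· < ·) := by
    rw [pvTaken]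
    exact PySem.List.sorted_ofList_pairwise_lt
      (xs := ((pvUsed key ex).filter pvNumOK).map (fun s => (pvDec s).getD 0))
  obtain ⟨h1, h2, h3⟩ := pvScan_spec _ hpw 2
  set M : Int := (PySem.List.sorted (pvTaken (pvUsed key ex)) (fun v => v) false).foldl
    (fun n v => if v == n then n + 1 else n) 2 with hM
  have hmemM : ∀ j : Int, j ∈ PySem.List.sorted (pvTaken (pvUsed key ex)) (fun v => v) false ↔
      (2 ≤ j ∧ key ++ PySem.Int.toStr j ∈ ex) := by
    intro j
    rw [PySem.List.mem_sorted, pvMem_taken, pvMem_used]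
  have hMNat : ((M.toNat : Nat) : Int) = M := Int.toNat_of_nonneg (by omega)
  rw [show M = ((M.toNat : Nat) : Int) from hMNat.symm]
  apply pvNumLoopA_eq key ex 2 M.toNat (by omega)
  · intro hc
    have : M ∈ PySem.List.sorted (pvTaken (pvUsed key ex)) (fun v => v) false := by
      rw [hmemM]
      refine ⟨by omega, ?_⟩
      rwa [← hMNat]
    exact h2 this
  · intro j hj1 hj2
    have : (j : Int) ∈ PySem.List.sorted (pvTaken (pvUsed key ex)) (fun v => v) false := by
      apply h3 j (by omega)
      omega
    exact (hmemM (j : Int)).mp this |>.2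

/-- A's letter loop agrees with B's filter-and-take-head selection. -/
theorem pvLetters_eq (key : String) (ex : List String) : ∀ cs : List Char,
    pvLetterLoopA key ex cs =
      (match cs.filter (fun c => !(PySem.Set.contains (pvUsed key ex) (String.singleton c))) with
        | c :: _ => key ++ String.singleton c
        | [] =>
          key ++ PySem.Int.toStr
            ((PySem.List.sorted (pvTaken (pvUsed key ex)) (fun v => v) false).foldl
              (fun n v => if v == n then n + 1 else n) 2)) := by
  intro cs
  induction cs with
  | nil =>
    simp only [List.filter_nil]
    exact pvNum_eq key ex
  | cons c rest ih =>
    have hcond : (!(PySem.Set.contains (pvUsed key ex) (String.singleton c))) =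
        decide (key ++ String.singleton c ∉ ex) := by
      rw [PySem.Set.contains_eq_decide, decide_not]
      exact congrArg (fun b => !b) (decide_eq_decide.mpr (pvMem_used key ex (String.singleton c)))
    rw [List.filter_cons, hcond]
    by_cases h : key ++ String.singleton c ∈ ex
    · rw [pvLetterLoopA, if_pos h, ih, if_neg (by simpa using h)]
    · rw [pvLetterLoopA, if_neg h, if_pos (by simpa using h)]

-- ===== VERDICT (by name: the statement is the Claim_ definition above) =====
theorem bump_suffix_py_spec : Claim_equal_bump_suffix_py := by
  intro key ex _
  unfold Spec_bump_suffix_py bump_suffix_py bump_suffix_py_alt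
  simp only [pvLETTERS]
  have hempty : ("" : String) ∈ pvUsed key ex ↔ key ∈ ex := by
    rw [pvMem_used]
    constructor
    · intro h; rwa [String.append_empty] at h
    · intro h; rwa [String.append_empty]
  by_cases hk : key ∈ ex
  · rw [if_neg (by simpa using hk),
      if_neg (by simp [hempty, hk]),
      pvLetters_eq key ex]
  · rw [if_pos hk, if_pos (by simp [hempty, hk])]
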